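-- pv_equiv track=rewrite | github.com/Prajeesh-Meethale/codecrafters-shell | app/main.py | parse_redirection
-- ===== SOURCE A (Python) =====
-- def parse_redirection(cmd_line):
--     """Parse redirection from a command line and return (command_part, redirect_file, redirect_stderr, redirect_append)."""
--     redirect_file = None
--     redirect_stderr = False
--     redirect_append = False
--
--     def is_outside_quotes(pos, text):
--         before = text[:pos]
--         in_single = False
--         in_double = False
--         j = 0
--         while j < len(before):
--             if before[j] == '\\' and j + 1 < len(before):
--                 j += 2
--                 continue
--             if before[j] == "'" and not in_double:
--                 in_single = not in_single
--             elif before[j] == '"' and not in_single: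
--                 in_double = not in_double
--             j += 1
--         return not in_single and not in_double
--
--     redirect_pos = -1
--     redirect_op = None
--
--     # Check for append operators first (2>>, 1>>, >>)
--     for i in range(len(cmd_line) - 2, -1, -1):
--         if cmd_line[i:i+3] == '2>>' and is_outside_quotes(i, cmd_line):
--             redirect_pos = i
--             redirect_op = '2>>'
--             redirect_stderr = True
--             redirect_append = True
--             break
--
--     if redirect_pos == -1:
--         for i in range(len(cmd_line) - 2, -1, -1):
--             if cmd_line[i:i+3] == '1>>' and is_outside_quotes(i, cmd_line):
--                 redirect_pos = i
--                 redirect_op = '1>>'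
--                 redirect_stderr = False
--                 redirect_append = True
--                 break
--
--     if redirect_pos == -1:
--         for i in range(len(cmd_line) - 1, -1, -1):
--             if cmd_line[i:i+2] == '>>' and is_outside_quotes(i, cmd_line):
--                 redirect_pos = i
--                 redirect_op = '>>'
--                 redirect_stderr = False
--                 redirect_append = True
--                 break
--
--     # Check for redirect operators (2>, 1>, >)
--     if redirect_pos == -1:
--         for i in range(len(cmd_line) - 1, -1, -1):
--             if cmd_line[i:i+2] == '2>' and is_outside_quotes(i, cmd_line):
--                 redirect_pos = i
--                 redirect_op = '2>'
--                 redirect_stderr = True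
--                 redirect_append = False
--                 break
--
--     if redirect_pos == -1:
--         for i in range(len(cmd_line) - 1, -1, -1):
--             if cmd_line[i:i+2] == '1>' and is_outside_quotes(i, cmd_line):
--                 redirect_pos = i
--                 redirect_op = '1>'
--                 redirect_stderr = False
--                 redirect_append = False
--                 break
--
--     if redirect_pos == -1:
--         for i in range(len(cmd_line) - 1, -1, -1):
--             if cmd_line[i] == '>' and is_outside_quotes(i, cmd_line):
--                 if i + 1 < len(cmd_line) and cmd_line[i+1] == '>':
--                     continue
--                 redirect_pos = i
--                 redirect_op = '>'
--                 redirect_stderr = False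
--                 redirect_append = False
--                 break
--
--     if redirect_pos != -1:
--         cmd_part = cmd_line[:redirect_pos].strip()
--         redirect_file = cmd_line[redirect_pos + len(redirect_op):].strip()
--         if redirect_file.startswith('"') and redirect_file.endswith('"'):
--             redirect_file = redirect_file[1:-1]
--         elif redirect_file.startswith("'") and redirect_file.endswith("'"):
--             redirect_file = redirect_file[1:-1]
--         return cmd_part, redirect_file, redirect_stderr, redirect_append
--
--     return cmd_line, None, False, False
-- ===== SOURCE B (Python) =====
-- def _finish(cmd_line, pos, oplen, stderr, append):
--     cmd_part = cmd_line[:pos].strip()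
--     redirect_file = cmd_line[pos + oplen:].strip()
--     if redirect_file.startswith('"') and redirect_file.endswith('"'):
--         redirect_file = redirect_file[1:-1]
--     elif redirect_file.startswith("'") and redirect_file.endswith("'"):
--         redirect_file = redirect_file[1:-1]
--     return cmd_part, redirect_file, stderr, append
--
--
-- def parse_redirection(cmd_line):
--     """Parse redirection from a command line and return (command_part, redirect_file, redirect_stderr, redirect_append)."""
--     p2gg = p1gg = pgg = p2g = p1g = pg = None
--     skip = in_s = in_d = False
--     i = 0
--     for c in cmd_line:
--         out = not in_s and not in_d
--         if skip:
--             skip = False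
--         elif c == '\\':
--             skip = True
--         elif c == "'" and not in_d:
--             in_s = not in_s
--         elif c == '"' and not in_s:
--             in_d = not in_d
--         if out and (c == '>' or c == '1' or c == '2'):
--             if c == '>':
--                 if cmd_line.startswith('>', i + 1):
--                     pgg = i
--                 else:
--                     pg = i
--             elif cmd_line.startswith('>', i + 1):
--                 if cmd_line.startswith('>', i + 2):
--                     if c == '2':
--                         p2gg = i
--                     else:
--                         p1gg = i
--                 if c == '2':
--                     p2g = i
--                 else:
--                     p1g = i
--         i += 1
--     if p2gg is not None:
--         return _finish(cmd_line, p2gg, 3, True, True)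
--     if p1gg is not None:
--         return _finish(cmd_line, p1gg, 3, False, True)
--     if pgg is not None:
--         return _finish(cmd_line, pgg, 2, False, True)
--     if p2g is not None:
--         return _finish(cmd_line, p2g, 2, True, False)
--     if p1g is not None:
--         return _finish(cmd_line, p1g, 2, False, False)
--     if pg is not None:
--         return _finish(cmd_line, pg, 1, False, False)
--     return cmd_line, None, False, False
-- ===== Notes on version B (the rewrite author's own statement) =====
-- stated objective: faster
-- what changed: A runs six separate right-to-left searches and re-scans the whole prefix to decide the quote state at every candidate index; B makes one fused left-to-right pass that carries the quote/escape state incrementally and records the rightmost outside-quotes match of each operator.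
import Mathlib
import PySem

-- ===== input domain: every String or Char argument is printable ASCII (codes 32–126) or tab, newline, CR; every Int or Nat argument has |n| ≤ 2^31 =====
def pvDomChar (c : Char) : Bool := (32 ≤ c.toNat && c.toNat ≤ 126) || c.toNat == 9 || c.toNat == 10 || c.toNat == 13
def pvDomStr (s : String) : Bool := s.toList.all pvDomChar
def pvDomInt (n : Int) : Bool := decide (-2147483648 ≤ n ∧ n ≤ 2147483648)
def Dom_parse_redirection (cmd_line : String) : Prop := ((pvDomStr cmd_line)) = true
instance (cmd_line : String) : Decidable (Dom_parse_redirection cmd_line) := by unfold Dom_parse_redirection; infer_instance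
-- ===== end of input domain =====

-- B replaces A's six right-to-left searches, each re-scanning the whole prefix for quote state
-- at every candidate index, by ONE fused left-to-right pass that carries the quote state
-- incrementally and records the rightmost match of each operator (objective: faster).

-- ===== PORT A =====

-- the `while j < len(before)` loop of is_outside_quotes; `before[j] == '\\' and j+1 < len(before)` skips two chars
def ioqLoop : List Char → Bool → Bool → Bool
  | [], in_single, in_double => !in_single && !in_double
  | c :: rest, in_single, in_double =>
    if c == '\\' && !rest.isEmpty then ioqLoop rest.tail in_single in_double
    else if c == '\'' && !in_double then ioqLoop rest (!in_single) in_double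
    else if c == '"' && !in_single then ioqLoop rest in_single (!in_double)
    else ioqLoop rest in_single in_double
termination_by l _ _ => l.length
decreasing_by
  · simp only [List.length_cons]; have := rest.length_tail; omega
  all_goals simp

-- is_outside_quotes(pos, text): before = text[:pos]
def is_outside_quotes (pos : Nat) (text : List Char) : Bool := ioqLoop (text.take pos) false false

-- `cmd_line[i:i+len(op)] == op and is_outside_quotes(i, cmd_line)`
def matchAtA (cmd op : List Char) (i : Nat) : Bool :=
  decide ((cmd.drop i).take op.length = op) && is_outside_quotes i cmd

-- the `>` loop folds its `continue` guard (`i+1 < len and cmd_line[i+1] == '>'`) into the test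
def matchGtA (cmd : List Char) (i : Nat) : Bool :=
  decide ((cmd.drop i).take 1 = ['>']) && is_outside_quotes i cmd &&
    !(decide (i + 1 < cmd.length) && decide (cmd.getD (i + 1) ' ' = '>'))

-- `for i in range(k, -1, -1): if P(i): return i` (a descending scan with break);
-- called with k = n-2 / n-1 as A does; for n = 0 or 1 Python's range is empty but the extra
-- index 0 tested here can never satisfy any operator predicate, so the result is the same
def scanDown (P : Nat → Bool) : Nat → Option Nat
  | 0 => if P 0 then some 0 else none
  | i + 1 => if P (i + 1) then some (i + 1) else scanDown P i

-- the common tail: cmd_line[:pos].strip(), cmd_line[pos+len(op):].strip(), un-quote (rf[1:-1])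
def finishRedir (cmd : List Char) (pos oplen : Nat) (stderr append : Bool) :
    String × Option String × Bool × Bool :=
  let cmd_part := PySem.Chars.strip (cmd.take pos)
  let rf0 := PySem.Chars.strip (cmd.drop (pos + oplen))
  let rf :=
    if PySem.Chars.startswith rf0 ['"'] && PySem.Chars.endswith rf0 ['"'] then rf0.tail.dropLast
    else if PySem.Chars.startswith rf0 ['\''] && PySem.Chars.endswith rf0 ['\''] then rf0.tail.dropLast
    else rf0
  (String.ofList cmd_part, some (String.ofList rf), stderr, append)

def parse_redirection (cmd_line : String) : String × Option String × Bool × Bool :=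
  let cmd := cmd_line.toList
  let n := cmd.length
  match scanDown (matchAtA cmd ['2', '>', '>']) (n - 2) with
  | some p => finishRedir cmd p 3 true true
  | none =>
  match scanDown (matchAtA cmd ['1', '>', '>']) (n - 2) with
  | some p => finishRedir cmd p 3 false true
  | none =>
  match scanDown (matchAtA cmd ['>', '>']) (n - 1) with
  | some p => finishRedir cmd p 2 false true
  | none =>
  match scanDown (matchAtA cmd ['2', '>']) (n - 1) with
  | some p => finishRedir cmd p 2 true false
  | none =>
  match scanDown (matchAtA cmd ['1', '>']) (n - 1) with
  | some p => finishRedir cmd p 2 false false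
  | none =>
  match scanDown (matchGtA cmd) (n - 1) with
  | some p => finishRedir cmd p 1 false false
  | none => (cmd_line, none, false, false)

-- ===== PORT B =====

-- the nine loop variables of Source B's single pass
structure BState where
  p2gg : Option Nat
  p1gg : Option Nat
  pgg : Option Nat
  p2g : Option Nat
  p1g : Option Nat
  pg : Option Nat
  skip : Bool
  in_s : Bool
  in_d : Bool

-- Source B's `for c in cmd_line` loop; i is the manual index counter
-- (cmd_line.startswith('>', k) is startswith of cmd[k:])
def bStep (cmd : List Char) (c : Char) (i : Nat) (st : BState) : BState :=
  let out := !st.in_s && !st.in_d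
  let st1 :=
    if st.skip then { st with skip := false }
    else if c == '\\' then { st with skip := true }
    else if c == '\'' && !st.in_d then { st with in_s := !st.in_s }
    else if c == '"' && !st.in_s then { st with in_d := !st.in_d }
    else st
  if out && (c == '>' || c == '1' || c == '2') then
    if c == '>' then
      if PySem.Chars.startswith (cmd.drop (i + 1)) ['>'] then { st1 with pgg := some i }
      else { st1 with pg := some i }
    else if PySem.Chars.startswith (cmd.drop (i + 1)) ['>'] then
      let stA :=
        if PySem.Chars.startswith (cmd.drop (i + 2)) ['>'] then
          if c == '2' then { st1 with p2gg := some i } else { st1 with p1gg := some i }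
        else st1
      if c == '2' then { stA with p2g := some i } else { stA with p1g := some i }
    else st1
  else st1

def bLoop (cmd : List Char) : List Char → Nat → BState → BState
  | [], _, st => st
  | c :: rest, i, st => bLoop cmd rest (i + 1) (bStep cmd c i st)

def parse_redirection_alt (cmd_line : String) : String × Option String × Bool × Bool :=
  let cmd := cmd_line.toList
  let st := bLoop cmd cmd 0 ⟨none, none, none, none, none, none, false, false, false⟩
  match st.p2gg with
  | some p => finishRedir cmd p 3 true true
  | none =>
  match st.p1gg with
  | some p => finishRedir cmd p 3 false true
  | none =>
  match st.pgg with
  | some p => finishRedir cmd p 2 false true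
  | none =>
  match st.p2g with
  | some p => finishRedir cmd p 2 true false
  | none =>
  match st.p1g with
  | some p => finishRedir cmd p 2 false false
  | none =>
  match st.pg with
  | some p => finishRedir cmd p 1 false false
  | none => (cmd_line, none, false, false)

-- ===== PRECONDITION & SPEC =====
def Spec_parse_redirection (cmd_line : String) (out : String × Option String × Bool × Bool) : Prop := out = parse_redirection_alt cmd_line
instance (cmd_line : String) (out : String × Option String × Bool × Bool) : Decidable (Spec_parse_redirection cmd_line out) := by unfold Spec_parse_redirection; infer_instance

-- ===== CLAIM (what is proved, stated in full; the proofs are below) =====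
def Claim_equal_parse_redirection : Prop := ∀ (cmd_line : String), Dom_parse_redirection cmd_line → Spec_parse_redirection cmd_line (parse_redirection cmd_line)

-- ===== LEMMAS AND PROOFS =====
-- quote-state step of one character, as a fold step (skip, in_single, in_double)
def qstep (st : Bool × Bool × Bool) (c : Char) : Bool × Bool × Bool :=
  if st.1 then (false, st.2.1, st.2.2)
  else if c == '\\' then (true, st.2.1, st.2.2)
  else if c == '\'' && !st.2.2 then (false, !st.2.1, st.2.2)
  else if c == '"' && !st.2.1 then (false, st.2.1, !st.2.2)
  else (false, st.2.1, st.2.2)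

def qemit (st : Bool × Bool × Bool) : Bool := !st.2.1 && !st.2.2
-- A's prefix re-scan equals the fold of qstep over the prefix
theorem ioqLoop_eq_fold (l : List Char) (s d : Bool) :
    ioqLoop l s d = qemit (l.foldl qstep (false, s, d)) := by
  induction l, s, d using ioqLoop.induct with
  | case1 s d => simp [ioqLoop, qemit]
  | case2 c rest s d h ih =>
    obtain ⟨hc, hne⟩ := Bool.and_eq_true_iff.mp h
    have hc' : c = '\\' := by simpa using hc
    subst hc'
    obtain ⟨r, rr, rfl⟩ : ∃ r rr, rest = r :: rr := by
      cases rest with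
      | nil => simp at hne
      | cons r rr => exact ⟨r, rr, rfl⟩
    simp only [ioqLoop, h, if_true, List.tail_cons] at ih ⊢
    rw [ih]
    simp [List.foldl_cons, qstep]
  | case3 c rest s d h1 h2 ih =>
    obtain ⟨hc, hd⟩ := Bool.and_eq_true_iff.mp h2
    have hc' : c = '\'' := by simpa using hc
    subst hc'
    have hd' : d = false := by simpa using hd
    subst hd'
    simp only [ioqLoop]
    rw [if_neg h1, if_pos h2, ih]
    simp [List.foldl_cons, qstep]
  | case4 c rest s d h1 h2 h3 ih =>
    obtain ⟨hc, hs⟩ := Bool.and_eq_true_iff.mp h3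
    have hc' : c = '"' := by simpa using hc
    subst hc'
    have hs' : s = false := by simpa using hs
    subst hs'
    simp only [ioqLoop]
    rw [if_neg h1, if_neg h2, if_pos h3, ih]
    simp [List.foldl_cons, qstep]
  | case5 c rest s d h1 h2 h3 ih =>
    simp only [ioqLoop]
    rw [if_neg h1, if_neg h2, if_neg h3]
    by_cases hc : c = '\\'
    · subst hc
      have hre : rest = [] := by simpa using h1
      subst hre
      simp [ioqLoop, List.foldl_cons, qstep, qemit]
    · rw [ih]
      have hq1 : (c == '\'' && !d) = false := by simpa using h2
      have hq2 : (c == '"' && !s) = false := by simpa using h3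
      simp [List.foldl_cons, qstep, hc, hq1, hq2]

-- Source B's startswith tests as A's slice comparisons
theorem startswith_eq_take (l p : List Char) :
    PySem.Chars.startswith l p = decide (l.take p.length = p) := by
  by_cases h : p <+: l
  · rw [(PySem.Chars.startswith_iff l p).mpr h, decide_eq_true ((List.prefix_iff_eq_take.mp h).symm)]
  · rw [decide_eq_false (fun he => h (List.prefix_iff_eq_take.mpr he.symm))]
    by_contra hb
    exact h ((PySem.Chars.startswith_iff l p).mp (by revert hb; cases PySem.Chars.startswith l p <;> simp))

-- peel one character off a slice comparison
theorem take_succ_eq (l : List Char) (i k : Nat) (c : Char) (cs : List Char) :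
    decide ((l.drop i).take (k + 1) = c :: cs)
      = ((l[i]? == some c) && decide ((l.drop (i + 1)).take k = cs)) := by
  have hd : l.drop (i + 1) = (l.drop i).tail := List.tail_drop.symm
  rw [hd, ← List.head?_drop]
  rcases h : l.drop i with _ | ⟨x, xs⟩
  · simp
  · simp [List.cons.injEq, Bool.beq_eq_decide_eq]
    cases hx : decide (x = c) <;> simp_all

theorem take_one_eq (l : List Char) (i : Nat) (c : Char) :
    decide ((l.drop i).take 1 = [c]) = (l[i]? == some c) := by
  have := take_succ_eq l i 0 c []
  simpa using this

theorem startswith_gt (l : List Char) (k : Nat) :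
    PySem.Chars.startswith (l.drop k) ['>'] = (l[k]? == some '>') := by
  rw [startswith_eq_take]
  exact take_one_eq l k '>'

-- the three shapes of A's match tests, decomposed into character lookups
theorem matchAtA3 (l : List Char) (a b c : Char) (i : Nat) :
    matchAtA l [a, b, c] i
      = (((l[i]? == some a) && ((l[i + 1]? == some b) && (l[i + 2]? == some c)))
          && is_outside_quotes i l) := by
  unfold matchAtA
  rw [show (([a, b, c] : List Char)).length = 2 + 1 from rfl, take_succ_eq,
    show (2 : Nat) = 1 + 1 from rfl, take_succ_eq,
    show i + 1 + 1 = i + 2 from by omega, take_one_eq]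

theorem matchAtA2 (l : List Char) (a b : Char) (i : Nat) :
    matchAtA l [a, b] i
      = (((l[i]? == some a) && (l[i + 1]? == some b)) && is_outside_quotes i l) := by
  unfold matchAtA
  rw [show (([a, b] : List Char)).length = 1 + 1 from rfl, take_succ_eq, take_one_eq]

theorem matchGtA_eq (l : List Char) (i : Nat) :
    matchGtA l i
      = (((l[i]? == some '>') && !(l[i + 1]? == some '>')) && is_outside_quotes i l) := by
  unfold matchGtA
  have e2 : (decide (i + 1 < l.length) && decide (l.getD (i + 1) ' ' = '>'))
      = (l[i + 1]? == some '>') := by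
    by_cases h : i + 1 < l.length
    · simp [h, Bool.beq_eq_decide_eq]
    · rw [List.getElem?_eq_none (by omega : l.length ≤ i + 1)]
      simp [h]
  rw [take_one_eq, e2]
  generalize (l[i]? == some '>') = P
  generalize (l[i + 1]? == some '>') = R
  generalize is_outside_quotes i l = Q
  cases P <;> cases Q <;> cases R <;> rfl

-- projections of one Source B loop iteration, in closed form
theorem bStep_quote (cmd : List Char) (c : Char) (i : Nat) (st : BState) :
    ((bStep cmd c i st).skip, (bStep cmd c i st).in_s, (bStep cmd c i st).in_d)
      = qstep (st.skip, st.in_s, st.in_d) c := by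
  unfold bStep qstep
  simp only [apply_ite BState.skip, apply_ite BState.in_s, apply_ite BState.in_d, ite_self]
  split_ifs <;> simp_all

theorem bStep_p2gg (cmd : List Char) (c : Char) (i : Nat) (st : BState) :
    (bStep cmd c i st).p2gg =
      (if ((!st.in_s && !st.in_d) && ((c == '2') && ((cmd[i + 1]? == some '>') && (cmd[i + 2]? == some '>'))))
       then some i else st.p2gg) := by
  unfold bStep
  rw [startswith_gt cmd (i + 1), startswith_gt cmd (i + 2)]
  simp only [apply_ite BState.p2gg, ite_self]
  split_ifs <;> simp_all

theorem bStep_p1gg (cmd : List Char) (c : Char) (i : Nat) (st : BState) :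
    (bStep cmd c i st).p1gg =
      (if ((!st.in_s && !st.in_d) && ((c == '1') && ((cmd[i + 1]? == some '>') && (cmd[i + 2]? == some '>'))))
       then some i else st.p1gg) := by
  unfold bStep
  rw [startswith_gt cmd (i + 1), startswith_gt cmd (i + 2)]
  simp only [apply_ite BState.p1gg, ite_self]
  split_ifs <;> simp_all

theorem bStep_pgg (cmd : List Char) (c : Char) (i : Nat) (st : BState) :
    (bStep cmd c i st).pgg =
      (if ((!st.in_s && !st.in_d) && ((c == '>') && (cmd[i + 1]? == some '>')))
       then some i else st.pgg) := by
  unfold bStep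
  rw [startswith_gt cmd (i + 1), startswith_gt cmd (i + 2)]
  simp only [apply_ite BState.pgg, ite_self]
  split_ifs <;> simp_all

theorem bStep_p2g (cmd : List Char) (c : Char) (i : Nat) (st : BState) :
    (bStep cmd c i st).p2g =
      (if ((!st.in_s && !st.in_d) && ((c == '2') && (cmd[i + 1]? == some '>')))
       then some i else st.p2g) := by
  unfold bStep
  rw [startswith_gt cmd (i + 1), startswith_gt cmd (i + 2)]
  simp only [apply_ite BState.p2g, ite_self]
  split_ifs <;> simp_all

theorem bStep_p1g (cmd : List Char) (c : Char) (i : Nat) (st : BState) :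
    (bStep cmd c i st).p1g =
      (if ((!st.in_s && !st.in_d) && ((c == '1') && (cmd[i + 1]? == some '>')))
       then some i else st.p1g) := by
  unfold bStep
  rw [startswith_gt cmd (i + 1), startswith_gt cmd (i + 2)]
  simp only [apply_ite BState.p1g, ite_self]
  split_ifs <;> simp_all

theorem bStep_pg (cmd : List Char) (c : Char) (i : Nat) (st : BState) :
    (bStep cmd c i st).pg =
      (if ((!st.in_s && !st.in_d) && ((c == '>') && !(cmd[i + 1]? == some '>')))
       then some i else st.pg) := by
  unfold bStep
  rw [startswith_gt cmd (i + 1), startswith_gt cmd (i + 2)]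
  simp only [apply_ite BState.pg, ite_self]
  split_ifs <;> simp_all

-- the single fused pass computes, field by field, the "last match wins" fold of A's predicates
theorem bLoop_fields (cmd : List Char) :
    ∀ (l : List Char) (i : Nat) (st : BState),
      l = cmd.drop i →
      (st.skip, st.in_s, st.in_d) = (cmd.take i).foldl qstep (false, false, false) →
      ((bLoop cmd l i st).p2gg
          = (List.range' i l.length).foldl (fun a j => if matchAtA cmd ['2', '>', '>'] j then some j else a) st.p2gg
      ∧ (bLoop cmd l i st).p1gg
          = (List.range' i l.length).foldl (fun a j => if matchAtA cmd ['1', '>', '>'] j then some j else a) st.p1gg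
      ∧ (bLoop cmd l i st).pgg
          = (List.range' i l.length).foldl (fun a j => if matchAtA cmd ['>', '>'] j then some j else a) st.pgg
      ∧ (bLoop cmd l i st).p2g
          = (List.range' i l.length).foldl (fun a j => if matchAtA cmd ['2', '>'] j then some j else a) st.p2g
      ∧ (bLoop cmd l i st).p1g
          = (List.range' i l.length).foldl (fun a j => if matchAtA cmd ['1', '>'] j then some j else a) st.p1g
      ∧ (bLoop cmd l i st).pg
          = (List.range' i l.length).foldl (fun a j => if matchGtA cmd j then some j else a) st.pg) := by
  intro l
  induction l with
  | nil =>
    intro i st _ _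
    simp [bLoop]
  | cons c rest ih =>
    intro i st hl hq
    have hci : cmd[i]? = some c := by
      rw [← List.head?_drop, ← hl]
      rfl
    have hrest : rest = cmd.drop (i + 1) := by
      rw [← List.tail_drop, ← hl]
      rfl
    have hq' : ((bStep cmd c i st).skip, (bStep cmd c i st).in_s, (bStep cmd c i st).in_d)
        = (cmd.take (i + 1)).foldl qstep (false, false, false) := by
      rw [bStep_quote, hq, List.take_add_one, hci]
      simp [List.foldl_append]
    have hout : (!st.in_s && !st.in_d) = is_outside_quotes i cmd := by
      have h2 := congrArg (fun t : Bool × Bool × Bool => t.2.1) hq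
      have h3 := congrArg (fun t : Bool × Bool × Bool => t.2.2) hq
      simp only at h2 h3
      unfold is_outside_quotes
      rw [ioqLoop_eq_fold]
      unfold qemit
      rw [h2, h3]
    obtain ⟨ih1, ih2, ih3, ih4, ih5, ih6⟩ := ih (i + 1) (bStep cmd c i st) hrest hq'
    have f1 : (bStep cmd c i st).p2gg = (if matchAtA cmd ['2', '>', '>'] i then some i else st.p2gg) := by
      rw [bStep_p2gg, matchAtA3, hci, ← hout]
      cases (!st.in_s && !st.in_d) <;> cases hx : (c == '2') <;>
        cases (cmd[i + 1]? == some '>') <;> cases (cmd[i + 2]? == some '>') <;> simp [hx]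
    have f2 : (bStep cmd c i st).p1gg = (if matchAtA cmd ['1', '>', '>'] i then some i else st.p1gg) := by
      rw [bStep_p1gg, matchAtA3, hci, ← hout]
      cases (!st.in_s && !st.in_d) <;> cases hx : (c == '1') <;>
        cases (cmd[i + 1]? == some '>') <;> cases (cmd[i + 2]? == some '>') <;> simp [hx]
    have f3 : (bStep cmd c i st).pgg = (if matchAtA cmd ['>', '>'] i then some i else st.pgg) := by
      rw [bStep_pgg, matchAtA2, hci, ← hout]
      cases (!st.in_s && !st.in_d) <;> cases hx : (c == '>') <;>
        cases (cmd[i + 1]? == some '>') <;> simp [hx]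
    have f4 : (bStep cmd c i st).p2g = (if matchAtA cmd ['2', '>'] i then some i else st.p2g) := by
      rw [bStep_p2g, matchAtA2, hci, ← hout]
      cases (!st.in_s && !st.in_d) <;> cases hx : (c == '2') <;>
        cases (cmd[i + 1]? == some '>') <;> simp [hx]
    have f5 : (bStep cmd c i st).p1g = (if matchAtA cmd ['1', '>'] i then some i else st.p1g) := by
      rw [bStep_p1g, matchAtA2, hci, ← hout]
      cases (!st.in_s && !st.in_d) <;> cases hx : (c == '1') <;>
        cases (cmd[i + 1]? == some '>') <;> simp [hx]
    have f6 : (bStep cmd c i st).pg = (if matchGtA cmd i then some i else st.pg) := by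
      rw [bStep_pg, matchGtA_eq, hci, ← hout]
      cases (!st.in_s && !st.in_d) <;> cases hx : (c == '>') <;>
        cases (cmd[i + 1]? == some '>') <;> simp [hx]
    simp only [bLoop, List.length_cons, List.range'_succ, List.foldl_cons]
    exact ⟨by rw [ih1, f1], by rw [ih2, f2], by rw [ih3, f3],
           by rw [ih4, f4], by rw [ih5, f5], by rw [ih6, f6]⟩
theorem matchAt_false_of_long (cmd op : List Char) (hop : op ≠ []) (i : Nat) (h : cmd.length < i + op.length) :
    matchAtA cmd op i = false := by
  unfold matchAtA
  have : ¬ ((cmd.drop i).take op.length = op) := by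
    intro he
    have hl := congrArg List.length he
    rw [List.length_take, List.length_drop] at hl
    have : 0 < op.length := List.length_pos_iff.mpr hop
    omega
  simp [this]

-- the "last index satisfying P wins" fold over range n equals A's descending scan from n-1
theorem foldl_range_eq_scanDown (P : Nat → Bool) :
    ∀ n, 1 ≤ n →
      (List.range n).foldl (fun a i => if P i then some i else a) none = scanDown P (n - 1) := by
  intro n
  induction n with
  | zero => omega
  | succ n ih =>
    intro _
    rw [List.range_succ, List.foldl_append]
    cases Nat.eq_zero_or_pos n with
    | inl h0 => subst h0; simp [scanDown]
    | inr hpos =>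
      have hn : n - 1 + 1 = n := by omega
      simp only [List.foldl_cons, List.foldl_nil, ih hpos, Nat.add_sub_cancel]
      rw [← hn]
      simp [scanDown]

-- for a 3-character operator the extra index n-1 that B's sweep covers can never match
theorem scanDown_drop_top (cmd op : List Char) (hop : op.length = 3) (n : Nat)
    (hn : n = cmd.length) (h1 : 1 ≤ n) :
    scanDown (matchAtA cmd op) (n - 1) = scanDown (matchAtA cmd op) (n - 2) := by
  cases Nat.lt_or_ge n 2 with
  | inl h => have : n = 1 := by omega
             rw [this]
  | inr h =>
    have e : n - 1 = (n - 2) + 1 := by omega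
    rw [e]
    simp only [scanDown]
    rw [matchAt_false_of_long cmd op (by intro he; rw [he] at hop; simp at hop) (n - 2 + 1) (by omega)]
    simp

-- ===== VERDICT (by name: the statement is the Claim_ definition above) =====
theorem parse_redirection_spec : Claim_equal_parse_redirection := by
  unfold Claim_equal_parse_redirection
  intro cmd_line _
  unfold Spec_parse_redirection
  simp only [parse_redirection, parse_redirection_alt]
  set l := cmd_line.toList with hl
  obtain ⟨e1, e2, e3, e4, e5, e6⟩ :=
    bLoop_fields l l 0 ⟨none, none, none, none, none, none, false, false, false⟩ (by simp) (by simp)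
  rw [← List.range_eq_range'] at e1 e2 e3 e4 e5 e6
  by_cases h0 : l.length = 0
  · have he : l = [] := List.length_eq_zero_iff.mp h0
    rw [he]
    rfl
  · have hn1 : 1 ≤ l.length := by omega
    rw [foldl_range_eq_scanDown _ _ hn1] at e1 e2 e3 e4 e5 e6
    rw [scanDown_drop_top l ['2', '>', '>'] rfl l.length rfl hn1] at e1
    rw [scanDown_drop_top l ['1', '>', '>'] rfl l.length rfl hn1] at e2
    rw [e1, e2, e3, e4, e5, e6]
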